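-- pv_equiv track=rewrite | github.com/pshah2983/AI-Driven-Resume-Evaluator | src/scoring.py | _get_resume_seniority
-- ===== SOURCE A (Python) =====
-- from typing import Dict, List, Optional, Tuple
--
-- def _get_resume_seniority(resume_data: Dict) -> str:
--     """Get overall seniority level from resume."""
--     experience = resume_data.get('experience', [])
--     if not experience:
--         return 'unknown'
--
--     # Check most recent role
--     seniority_levels = [exp.get('seniority_level', 'unknown') for exp in experience]
--
--     # Return most senior level found
--     if 'senior' in seniority_levels:
--         return 'senior'
--     elif 'mid' in seniority_levels:
--         return 'mid'
--     elif 'junior' in seniority_levels: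
--         return 'junior'
--     else:
--         return 'unknown'
-- ===== SOURCE B (Python) =====
-- def _get_resume_seniority(resume_data):
--     """Get overall seniority level from resume."""
--     experience = resume_data.get('experience', [])
--     if not experience:
--         return 'unknown'
--     rank = {'junior': 1, 'mid': 2, 'senior': 3}
--     best = 0
--     for exp in experience:
--         best = max(best, rank.get(exp.get('seniority_level', 'unknown'), 0))
--     return {3: 'senior', 2: 'mid', 1: 'junior', 0: 'unknown'}[best]
-- ===== Notes on version B (the rewrite author's own statement) =====
-- stated objective: idiomatic
-- what changed: Replaced the list comprehension plus three ordered membership scans with a single pass computing the maximum numeric rank via a rank table, then a reverse lookup maps the best rank back to its label.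
import Mathlib
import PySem

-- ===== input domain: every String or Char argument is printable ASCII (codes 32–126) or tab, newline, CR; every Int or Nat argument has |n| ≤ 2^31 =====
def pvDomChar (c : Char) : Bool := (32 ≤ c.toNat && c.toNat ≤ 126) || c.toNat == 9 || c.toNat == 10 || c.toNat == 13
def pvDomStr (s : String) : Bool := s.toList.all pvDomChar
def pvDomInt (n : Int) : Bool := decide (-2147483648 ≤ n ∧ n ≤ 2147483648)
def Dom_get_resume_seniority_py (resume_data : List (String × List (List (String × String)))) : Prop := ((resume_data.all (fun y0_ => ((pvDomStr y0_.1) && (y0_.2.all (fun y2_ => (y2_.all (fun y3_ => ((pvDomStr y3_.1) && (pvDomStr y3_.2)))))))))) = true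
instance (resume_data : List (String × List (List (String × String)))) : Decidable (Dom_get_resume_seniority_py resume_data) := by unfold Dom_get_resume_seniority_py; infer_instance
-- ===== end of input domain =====

-- B replaces A's three ordered membership scans with one max-of-ranks pass plus a reverse rank table (idiomatic, same cost).

-- ===== PORT A =====
def get_resume_seniority_py (resume_data : List (String × List (List (String × String)))) : String :=
  let experience := (PySem.Dict.mk resume_data).getD "experience" []
  if experience.isEmpty then "unknown"
  else
    let seniority_levels := experience.map (fun exp => (PySem.Dict.mk exp).getD "seniority_level" "unknown")
    if seniority_levels.contains "senior" then "senior"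
    else if seniority_levels.contains "mid" then "mid"
    else if seniority_levels.contains "junior" then "junior"
    else "unknown"

-- ===== PORT B =====
-- rank.get(s, 0) of Source B's rank table
def pvRank (s : String) : Int :=
  (PySem.Dict.mk [("junior", (1 : Int)), ("mid", 2), ("senior", 3)]).getD s 0

-- Source B's final `{…}[best]` is a plain dict subscript; best is always one of its keys 0..3,
-- so the `getD … "unknown"` default used here to make the lookup total is never reached.
def get_resume_seniority_py_alt (resume_data : List (String × List (List (String × String)))) : String :=
  let experience := (PySem.Dict.mk resume_data).getD "experience" []
  if experience.isEmpty then "unknown"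
  else
    let best := experience.foldl
      (fun b exp => max b (pvRank ((PySem.Dict.mk exp).getD "seniority_level" "unknown"))) 0
    (PySem.Dict.mk [((3 : Int), "senior"), (2, "mid"), (1, "junior"), (0, "unknown")]).getD best "unknown"

-- ===== PRECONDITION & SPEC =====
def Spec_get_resume_seniority_py (resume_data : List (String × List (List (String × String)))) (out : String) : Prop := out = get_resume_seniority_py_alt resume_data
instance (resume_data : List (String × List (List (String × String)))) (out : String) : Decidable (Spec_get_resume_seniority_py resume_data out) := by unfold Spec_get_resume_seniority_py; infer_instance

-- ===== CLAIM (what is proved, stated in full; the proofs are below) =====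
def Claim_equal_get_resume_seniority_py : Prop := ∀ (resume_data : List (String × List (List (String × String)))), Dom_get_resume_seniority_py resume_data → Spec_get_resume_seniority_py resume_data (get_resume_seniority_py resume_data)

-- ===== LEMMAS AND PROOFS =====

-- the "most senior level present" in a list of labels, as a numeric rank (A's decision, numerically)
def pvBest (l : List String) : Int :=
  if l.contains "senior" then 3 else if l.contains "mid" then 2
  else if l.contains "junior" then 1 else 0

theorem pvRank_eq (s : String) :
    pvRank s = if s = "senior" then 3 else if s = "mid" then 2
               else if s = "junior" then 1 else 0 := by
  by_cases h1 : s = "senior"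
  · subst h1; decide
  · by_cases h2 : s = "mid"
    · subst h2; decide
    · by_cases h3 : s = "junior"
      · subst h3; decide
      · have j1 : ("junior" == s) = false := beq_eq_false_iff_ne.mpr (Ne.symm h3)
        have j2 : ("mid" == s) = false := beq_eq_false_iff_ne.mpr (Ne.symm h2)
        have j3 : ("senior" == s) = false := beq_eq_false_iff_ne.mpr (Ne.symm h1)
        simp [pvRank, PySem.Dict.getD_eq_get?_getD, PySem.Dict.get?_mk_cons,
          PySem.Dict.get?, j1, j2, j3, h1, h2, h3]

theorem pvBest_cons (s : String) (l : List String) :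
    pvBest (s :: l) = max (pvRank s) (pvBest l) := by
  simp only [pvBest, List.contains_cons, pvRank_eq, Bool.or_eq_true, beq_iff_eq]
  by_cases h1 : s = "senior" <;> by_cases h2 : s = "mid" <;> by_cases h3 : s = "junior" <;>
    simp_all <;> split_ifs <;> simp_all <;> omega

theorem pvBest_nonneg (l : List String) : 0 ≤ pvBest l := by
  unfold pvBest; split_ifs <;> omega

-- B's fold computes max of the starting value and pvBest of the mapped labels
theorem fold_max_map {α : Type} (g : α → String) (l : List α) (b : Int) (hb : 0 ≤ b) :
    l.foldl (fun b e => max b (pvRank (g e))) b = max b (pvBest (l.map g)) := by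
  induction l generalizing b with
  | nil => simp [pvBest]; omega
  | cons s t ih =>
    have hr : (0:Int) ≤ max b (pvRank (g s)) := le_trans hb (le_max_left _ _)
    simp only [List.foldl_cons, List.map_cons]
    rw [ih _ hr, pvBest_cons]
    omega

-- ===== VERDICT (by name: the statement is the Claim_ definition above) =====
theorem get_resume_seniority_py_spec : Claim_equal_get_resume_seniority_py := by
  unfold Claim_equal_get_resume_seniority_py
  intro rd _
  unfold Spec_get_resume_seniority_py get_resume_seniority_py get_resume_seniority_py_alt
  set exp := (PySem.Dict.mk rd).getD "experience" [] with hexp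
  by_cases he : exp.isEmpty
  · simp [he]
  · simp only [he, if_false]
    set ls := exp.map (fun e => (PySem.Dict.mk e).getD "seniority_level" "unknown") with hls
    have hfold : exp.foldl
        (fun b e => max b (pvRank ((PySem.Dict.mk e).getD "seniority_level" "unknown"))) 0
        = pvBest ls := by
      rw [fold_max_map _ exp 0 le_rfl, ← hls]
      have := pvBest_nonneg ls
      omega
    rw [hfold]
    unfold pvBest
    by_cases h1 : "senior" ∈ ls <;> by_cases h2 : "mid" ∈ ls <;>
      by_cases h3 : "junior" ∈ ls <;>
      simp [h1, h2, h3, List.contains_iff_mem, PySem.Dict.getD_eq_get?_getD,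
        PySem.Dict.get?_mk_cons, PySem.Dict.get?_empty]
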